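-- pv_equiv track=rewrite | github.com/Danmunozbe/ProyectoDalgoParte1 | ProyectoDalgoP1/ProyectoDalgoP1.py | algoritmo1_sol
-- ===== SOURCE A (Python) =====
-- def creativity(x, P):
--     """
--     Calcula la creatividad de asignar x unidades de energía a una celda,
--     según las reglas con dígitos (3,6,9) y los pesos P.
--     """
--     score = 0
--     pos = 0
--     while x > 0:
--         d = x % 10
--         if d in (3, 6, 9):
--             mult = d // 3  # 3->1, 6->2, 9->3
--             score += mult * P[pos]
--         pos += 1
--         x //= 10
--     return score
--
-- def algoritmo1_sol(k, N, Pi):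
--     dp = [[0]*(N+1) for _ in range(k+1)]
--     for i in range(1, N+1):
--         dp[1][i] = creativity(i, Pi)
--     for j in range(2, k+1):
--         for i in range(1, N+1):
--             for x in range(0, i):
--                 dp[j][i] = max(dp[j][i], dp[j-1][i-x] + dp[1][x])
--     return dp[k][N]
-- ===== SOURCE B (Python) =====
-- def creativity(x, P):
--     """
--     Calcula la creatividad de asignar x unidades de energía a una celda,
--     según las reglas con dígitos (3,6,9) y los pesos P.
--     """
--     score = 0
--     pos = 0
--     while x > 0:
--         d = x % 10
--         if d in (3, 6, 9):
--             mult = d // 3  # 3->1, 6->2, 9->3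
--             score += mult * P[pos]
--         pos += 1
--         x //= 10
--     return score
--
--
-- def _conv(a, b):
--     # max-plus convolution of two rows of equal length
--     return [max(a[x] + b[n - x] for x in range(n + 1)) for n in range(len(a))]
--
--
-- def _mp_pow(base, e):
--     # e-fold max-plus convolution power of base, by repeated squaring
--     if e <= 1:
--         return base
--     half = _mp_pow(base, e // 2)
--     sq = _conv(half, half)
--     return sq if e % 2 == 0 else _conv(sq, base)
--
--
-- def algoritmo1_sol(k, N, Pi):
--     F = [creativity(i, Pi) for i in range(N + 1)]
--     return _mp_pow(F, k)[N]
-- ===== Notes on version B (the rewrite author's own statement) =====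
-- stated objective: faster
-- what changed: A fills a (k+1)x(N+1) dp table with a triple loop, chaining k-1 max-plus convolutions with the base creativity row; B computes the creativity row once and raises it to the k-th max-plus-convolution power by repeated squaring (about log k convolutions instead of k). Pre_ excludes only inputs where A raises IndexError (k<=-1, k=0 with N>=1, N<0, or N large enough that creativity indexes past Pi).
import Mathlib
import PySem

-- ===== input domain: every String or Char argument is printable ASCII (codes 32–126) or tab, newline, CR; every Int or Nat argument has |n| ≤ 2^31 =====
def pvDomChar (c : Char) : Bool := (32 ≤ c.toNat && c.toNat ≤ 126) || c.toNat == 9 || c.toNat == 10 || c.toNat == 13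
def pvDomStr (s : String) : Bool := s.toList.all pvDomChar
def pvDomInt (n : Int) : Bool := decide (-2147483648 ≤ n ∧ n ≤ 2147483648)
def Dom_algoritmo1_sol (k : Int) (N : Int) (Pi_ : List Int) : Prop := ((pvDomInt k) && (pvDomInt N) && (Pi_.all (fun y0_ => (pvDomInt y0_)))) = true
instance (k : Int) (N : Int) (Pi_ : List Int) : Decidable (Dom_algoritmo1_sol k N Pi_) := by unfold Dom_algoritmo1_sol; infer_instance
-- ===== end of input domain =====

-- B replaces A's three-loop dp table (one table layer per cell) with the k-fold max-plus
-- convolution power of the base creativity row, computed by repeated squaring.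

-- ===== PORT A =====
def creatGo (x : Nat) (P : List Int) (pos : Nat) : Int :=
  if _hx : x = 0 then 0
  else
    (if x % 10 = 3 ∨ x % 10 = 6 ∨ x % 10 = 9 then ((x % 10) / 3 : Nat) * (PySem.List.pyGetD P (pos : Int) 0) else 0)
      + creatGo (x / 10) P (pos + 1)
termination_by x
decreasing_by exact Nat.div_lt_self (Nat.pos_of_ne_zero _hx) (by norm_num)

def creat (x : Int) (P : List Int) : Int := creatGo x.toNat P 0

def tget (t : List (List Int)) (j i : Int) : Int :=
  PySem.List.pyGetD (PySem.List.pyGetD t j []) i 0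

def tset (t : List (List Int)) (j i : Int) (v : Int) : List (List Int) :=
  PySem.List.pySetD t j (PySem.List.pySetD (PySem.List.pyGetD t j []) i v)

def algoritmo1_sol (k : Int) (N : Int) (Pi_ : List Int) : Int :=
  let dp0 : List (List Int) :=
    (PySem.List.pyRange 0 (k+1) 1).map (fun _ => List.replicate (N+1).toNat (0 : Int))
  let dp1 := (PySem.List.pyRange 1 (N+1) 1).foldl (fun t i => tset t 1 i (creat i Pi_)) dp0
  let dp2 := (PySem.List.pyRange 2 (k+1) 1).foldl (fun t j =>
      (PySem.List.pyRange 1 (N+1) 1).foldl (fun t i =>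
        (PySem.List.pyRange 0 i 1).foldl (fun t x =>
          tset t j i (max (tget t j i) (tget t (j-1) (i-x) + tget t 1 x))) t) t) dp1
  tget dp2 k N


-- ===== PORT B =====
def convL (a b : List Int) : List Int :=
  (PySem.List.pyRange 0 (PySem.List.len a) 1).map (fun i =>
    (PySem.List.max?
      ((PySem.List.pyRange 0 (i+1) 1).map
        (fun x => PySem.List.pyGetD a x 0 + PySem.List.pyGetD b (i-x) 0))
      (fun y => y)).getD 0)

def mpPow (base : List Int) (e : Nat) : List Int :=
  if e ≤ 1 then base
  else
    let half := mpPow base (e / 2)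
    let sq := convL half half
    if e % 2 = 0 then sq else convL sq base
termination_by e
decreasing_by exact Nat.div_lt_self (by omega) (by norm_num)

def algoritmo1_sol_alt (k : Int) (N : Int) (Pi_ : List Int) : Int :=
  let F := (PySem.List.pyRange 0 (N+1) 1).map (fun i => creat i Pi_)
  PySem.List.pyGetD (mpPow F k.toNat) N 0


-- ===== PRECONDITION & SPEC =====
-- Pre_ is exactly the set of inputs on which Python A returns normally: A raises IndexError
-- when k ≤ -1, when N < 0, when k = 0 with N ≥ 1 (dp has no row 1), and when N ≥ 3·10^len(Pi)
-- (creativity(i, Pi) indexes Pi[pos] past its end, first at i = 3·10^len(Pi)).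
def Pre_algoritmo1_sol (k : Int) (N : Int) (Pi_ : List Int) : Prop :=
  (1 ≤ k ∨ (k = 0 ∧ N = 0)) ∧ 0 ≤ N ∧ N < 3 * 10 ^ Pi_.length
instance (k : Int) (N : Int) (Pi_ : List Int) : Decidable (Pre_algoritmo1_sol k N Pi_) := by
  unfold Pre_algoritmo1_sol; infer_instance

def pvWitness_algoritmo1_sol : Int × Int × List Int := (2, 3, [1, 2])

def Spec_algoritmo1_sol (k : Int) (N : Int) (Pi_ : List Int) (out : Int) : Prop := out = algoritmo1_sol_alt k N Pi_
instance (k : Int) (N : Int) (Pi_ : List Int) (out : Int) : Decidable (Spec_algoritmo1_sol k N Pi_ out) := by unfold Spec_algoritmo1_sol; infer_instance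

-- ===== CLAIM (what is proved, stated in full; the proofs are below) =====
def Claim_equal_algoritmo1_sol : Prop := ∀ (k : Int) (N : Int) (Pi_ : List Int), Dom_algoritmo1_sol k N Pi_ → Pre_algoritmo1_sol k N Pi_ → Spec_algoritmo1_sol k N Pi_ (algoritmo1_sol k N Pi_)

-- ===== LEMMAS AND PROOFS =====
def rne (n : ℕ) : (Finset.range (n+1)).Nonempty := ⟨0, by simp⟩

-- running-max fold ↔ Finset.sup'
theorem foldl_max_sup' (h : ℕ → ℤ) : ∀ (n : ℕ) (c : ℤ),
    (List.range (n+1)).foldl (fun a x => max a (h x)) c = max c ((Finset.range (n+1)).sup' (rne n) h) := by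
  intro n
  induction n with
  | zero => intro c; simp [List.range_succ]
  | succ m ih =>
    intro c
    rw [List.range_succ, List.foldl_append, ih]
    simp only [List.foldl_cons, List.foldl_nil]
    have : (Finset.range (m+1+1)).sup' (rne (m+1)) h
        = max ((Finset.range (m+1)).sup' (rne m) h) (h (m+1)) := by
      apply le_antisymm
      · apply Finset.sup'_le
        intro x hx
        rcases Nat.lt_succ_iff_lt_or_eq.mp (Finset.mem_range.mp hx) with hlt | heq
        · exact le_trans (Finset.le_sup' h (Finset.mem_range.mpr hlt)) (le_max_left _ _)
        · subst heq; exact le_max_right _ _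
      · apply max_le
        · apply Finset.sup'_le
          intro x hx
          exact Finset.le_sup' h (Finset.mem_range.mpr (by simp at hx; omega))
        · exact Finset.le_sup' h (Finset.mem_range.mpr (by omega))
    rw [this, max_assoc]

theorem sup'_shift (h : ℕ → ℤ) : ∀ (n : ℕ),
    (Finset.range (n+1+1)).sup' (rne (n+1)) h
      = max (h 0) ((Finset.range (n+1)).sup' (rne n) (fun x => h (x+1))) := by
  intro n
  apply le_antisymm
  · apply Finset.sup'_le
    intro x hx
    rcases Nat.eq_zero_or_pos x with h0 | hpos
    · subst h0; exact le_max_left _ _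
    · obtain ⟨y, rfl⟩ := Nat.exists_eq_add_of_lt hpos
      · exact le_trans (Finset.le_sup' (fun x => h (x+1)) (by simp at hx ⊢; omega)) (le_max_right _ _)
  · apply max_le
    · exact Finset.le_sup' h (by simp)
    · apply Finset.sup'_le
      intro y hy
      exact Finset.le_sup' h (by simp at hy ⊢; omega)

theorem max?_map_range (h : ℕ → ℤ) (n : ℕ) :
    (PySem.List.max? ((List.range (n+1)).map h) (fun y => y)).getD 0
      = (Finset.range (n+1)).sup' (rne n) h := by
  cases n with
  | zero => simp [List.range_succ, PySem.List.max?_id_cons]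
  | succ m =>
    rw [List.range_succ_eq_map, List.map_cons, PySem.List.max?_id_cons, Option.getD_some,
      List.map_map, List.foldl_map]
    have : (List.range (m+1)).foldl (fun a x => max a (h (x+1))) (h 0)
        = max (h 0) ((Finset.range (m+1)).sup' (rne m) (fun x => h (x+1))) := by
      have := foldl_max_sup' (fun x => h (x+1)) m (h 0)
      simpa using this
    rw [show (h ∘ Nat.succ) = fun x => h (x+1) from rfl] at *
    simp only [] at *
    rw [this, sup'_shift]

theorem add_sup' (s : Finset ℕ) (H : s.Nonempty) (h : ℕ → ℤ) (c : ℤ) :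
    (s.sup' H h) + c = s.sup' H (fun x => h x + c) := by
  obtain ⟨b, hb, he⟩ := Finset.exists_mem_eq_sup' H h
  apply le_antisymm
  · rw [he]; exact Finset.le_sup' (fun x => h x + c) hb
  · apply Finset.sup'_le
    intro x hx
    exact add_le_add (Finset.le_sup' h hx) le_rfl

theorem sup'_max_split (s : Finset ℕ) (H : s.Nonempty) (u v : ℕ → ℤ) :
    s.sup' H (fun x => max (u x) (v x)) = max (s.sup' H u) (s.sup' H v) := by
  apply le_antisymm
  · apply Finset.sup'_le
    intro x hx
    exact max_le_max (Finset.le_sup' u hx) (Finset.le_sup' v hx)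
  · apply max_le
    · apply Finset.sup'_le; intro x hx
      exact le_trans (le_max_left _ _) (Finset.le_sup' (fun x => max (u x) (v x)) hx)
    · apply Finset.sup'_le; intro x hx
      exact le_trans (le_max_right _ _) (Finset.le_sup' (fun x => max (u x) (v x)) hx)

-- max-plus convolution
def pconv (f g : ℕ → ℤ) (n : ℕ) : ℤ :=
  (Finset.range (n+1)).sup' (rne n) (fun x => f x + g (n - x))

theorem pconv_le (f g : ℕ → ℤ) {n x : ℕ} (hx : x ≤ n) : f x + g (n - x) ≤ pconv f g n :=
  Finset.le_sup' (fun x => f x + g (n - x)) (Finset.mem_range.mpr (by omega))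

theorem pconv_le_of (f g : ℕ → ℤ) {n : ℕ} {a : ℤ} (h : ∀ x, x ≤ n → f x + g (n - x) ≤ a) :
    pconv f g n ≤ a := by
  apply Finset.sup'_le
  intro x hx
  exact h x (by simpa using Nat.lt_succ_iff.mp (Finset.mem_range.mp hx))

theorem pconv_congr {f1 f2 g1 g2 : ℕ → ℤ} {n : ℕ}
    (hf : ∀ x, x ≤ n → f1 x = f2 x) (hg : ∀ x, x ≤ n → g1 x = g2 x) :
    pconv f1 g1 n = pconv f2 g2 n := by
  apply Finset.sup'_congr _ rfl
  intro x hx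
  have hx' : x ≤ n := Nat.lt_succ_iff.mp (Finset.mem_range.mp hx)
  rw [hf x hx', hg (n - x) (by omega)]

theorem pconv_assoc (f g h : ℕ → ℤ) (n : ℕ) :
    pconv (pconv f g) h n = pconv f (pconv g h) n := by
  apply le_antisymm
  · apply pconv_le_of
    intro x hx
    rw [show pconv f g x + h (n - x) = (Finset.range (x+1)).sup' (rne x) (fun y => (f y + g (x - y)) + h (n - x)) from add_sup' _ _ _ _]
    apply Finset.sup'_le
    intro y hy
    have hy' : y ≤ x := Nat.lt_succ_iff.mp (Finset.mem_range.mp hy)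
    calc f y + g (x - y) + h (n - x)
        = f y + (g (x - y) + h ((n - y) - (x - y))) := by
          rw [show (n - y) - (x - y) = n - x by omega]; ring
      _ ≤ f y + pconv g h (n - y) := by
          apply add_le_add le_rfl
          exact pconv_le g h (by omega)
      _ ≤ pconv f (pconv g h) n := pconv_le f (pconv g h) (by omega)
  · apply pconv_le_of
    intro x hx
    rw [show f x + pconv g h (n - x) = (Finset.range (n-x+1)).sup' (rne (n-x)) (fun z => f x + (g z + h ((n-x) - z))) from ?_]
    · apply Finset.sup'_le
      intro z hz
      have hz' : z ≤ n - x := Nat.lt_succ_iff.mp (Finset.mem_range.mp hz)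
      calc f x + (g z + h ((n-x) - z))
          = (f x + g ((x+z) - x)) + h (n - (x+z)) := by
            rw [show (x+z) - x = z by omega, show n - (x+z) = (n-x) - z by omega]; ring
        _ ≤ pconv f g (x+z) + h (n - (x+z)) := by
            refine add_le_add ?_ le_rfl
            exact pconv_le f g (by omega)
        _ ≤ pconv (pconv f g) h n := pconv_le (pconv f g) h (by omega)
    · obtain ⟨b, hb, he⟩ := Finset.exists_mem_eq_sup' (rne (n-x)) (fun z => g z + h ((n-x) - z))
      show f x + pconv g h (n-x) = _
      unfold pconv
      rw [show (fun z => f x + (g z + h ((n-x) - z))) = (fun z => (g z + h ((n-x) - z)) + f x) from funext (fun z => by ring)]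
      rw [← add_sup' _ (rne (n-x)) _ (f x)]
      ring

-- k-fold max-plus power: pwp f j = f^{*(j+1)}
def pwp (f : ℕ → ℤ) : ℕ → ℕ → ℤ
  | 0 => f
  | (j+1) => fun n => pconv (pwp f j) f n

theorem pwp_add (f : ℕ → ℤ) (a : ℕ) : ∀ (b : ℕ) (n : ℕ),
    pwp f (a + b + 1) n = pconv (pwp f a) (pwp f b) n := by
  intro b
  induction b with
  | zero => intro n; rfl
  | succ m ih =>
    intro n
    have : a + (m + 1) + 1 = (a + m + 1) + 1 := by omega
    rw [this]
    show pconv (pwp f (a + m + 1)) f n = _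
    calc pconv (pwp f (a + m + 1)) f n
        = pconv (pconv (pwp f a) (pwp f m)) f n := by
          exact pconv_congr (fun x _ => ih x) (fun _ _ => rfl)
      _ = pconv (pwp f a) (pconv (pwp f m) f) n := pconv_assoc _ _ _ n
      _ = pconv (pwp f a) (pwp f (m+1)) n := rfl

theorem pwp_ge_base (f : ℕ → ℤ) (hf0 : f 0 = 0) : ∀ (j n : ℕ), f n ≤ pwp f j n := by
  intro j
  induction j with
  | zero => intro n; exact le_refl _
  | succ m ih =>
    intro n
    calc f n ≤ pwp f m n := ih n
      _ = pwp f m n + f (n - n) := by simp [hf0]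
      _ ≤ pconv (pwp f m) f n := pconv_le _ _ le_rfl
      _ = pwp f (m+1) n := rfl

theorem pwp_mono (f : ℕ → ℤ) (hf0 : f 0 = 0) (j n : ℕ) : pwp f j n ≤ pwp f (j+1) n := by
  calc pwp f j n = pwp f j n + f (n - n) := by simp [hf0]
    _ ≤ pconv (pwp f j) f n := pconv_le _ _ le_rfl
    _ = pwp f (j+1) n := rfl

theorem pwp_nonneg (f : ℕ → ℤ) (hf0 : f 0 = 0) (h1 : ∀ n, 0 ≤ pwp f 1 n) :
    ∀ (j : ℕ), 1 ≤ j → ∀ (n : ℕ), 0 ≤ pwp f j n := by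
  intro j
  induction j with
  | zero => intro h; omega
  | succ m ih =>
    intro _ n
    rcases Nat.eq_zero_or_pos m with h0 | hpos
    · subst h0; exact h1 n
    · exact le_trans (ih hpos n) (pwp_mono f hf0 m n)

-- the clamp ("max with 0") accumulator of A's chain
def Cf (f : ℕ → ℤ) : ℕ → ℕ → ℤ
  | 0 => fun _ => 0
  | (j+1) => fun n => (Finset.range (n+1)).sup' (rne n) (fun y => max 0 (pwp f j y))

theorem Cf_nonneg (f : ℕ → ℤ) (j n : ℕ) : 0 ≤ Cf f j n := by
  cases j with
  | zero => exact le_refl _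
  | succ m =>
    exact le_trans (le_max_left 0 (pwp f m 0))
      (Finset.le_sup' (fun y => max 0 (pwp f m y)) (Finset.mem_range.mpr (by omega)))

theorem Cf_le (f : ℕ → ℤ) (j : ℕ) {y n : ℕ} (hy : y ≤ n) :
    max 0 (pwp f j y) ≤ Cf f (j+1) n :=
  Finset.le_sup' (fun y => max 0 (pwp f j y)) (Finset.mem_range.mpr (by omega))

theorem clamp_step (f : ℕ → ℤ) (hf0 : f 0 = 0) (j n : ℕ) :
    max 0 (pconv (Cf f j) f n) = Cf f (j+1) n := by
  apply le_antisymm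
  · apply max_le (Cf_nonneg f (j+1) n)
    apply pconv_le_of
    intro x hx
    cases j with
    | zero =>
      show (0 : ℤ) + f (n - x) ≤ Cf f 1 n
      rw [zero_add]
      exact le_trans (le_max_right 0 (pwp f 0 (n-x))) (Cf_le f 0 (by omega))
    | succ m =>
      show Cf f (m+1) x + f (n - x) ≤ Cf f (m+2) n
      rw [show Cf f (m+1) x = (Finset.range (x+1)).sup' (rne x) (fun y => max 0 (pwp f m y)) from rfl]
      rw [add_sup']
      apply Finset.sup'_le
      intro z hz
      have hz' : z ≤ x := Nat.lt_succ_iff.mp (Finset.mem_range.mp hz)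
      have hsplit : max 0 (pwp f m z) + f (n - x) = max (f (n-x)) (pwp f m z + f (n - x)) := by
        rw [← max_add_add_right]; simp
      rw [hsplit]
      apply max_le
      · exact le_trans (le_trans (pwp_ge_base f hf0 (m+1) (n-x)) (le_max_right 0 _)) (Cf_le f (m+1) (by omega))
      · calc pwp f m z + f (n - x)
            = pwp f m z + f ((z + (n-x)) - z) := by rw [show (z + (n-x)) - z = n - x by omega]
          _ ≤ pconv (pwp f m) f (z + (n-x)) := pconv_le _ _ (by omega)
          _ = pwp f (m+1) (z + (n-x)) := rfl
          _ ≤ max 0 (pwp f (m+1) (z + (n-x))) := le_max_right _ _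
          _ ≤ Cf f (m+2) n := Cf_le f (m+1) (by omega)
  · refine Finset.sup'_le (rne n) _ ?_
    intro y hy
    have hy' : y ≤ n := Nat.lt_succ_iff.mp (Finset.mem_range.mp hy)
    apply max_le (le_max_left _ _)
    refine le_trans ?_ (le_max_right 0 (pconv (Cf f j) f n))
    cases j with
    | zero =>
      show pwp f 0 y ≤ pconv (Cf f 0) f n
      calc f y = (0 : ℤ) + f (n - (n - y)) := by rw [show n - (n-y) = y by omega]; ring
        _ ≤ pconv (Cf f 0) f n := pconv_le (Cf f 0) f (by omega)
    | succ m =>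
      show pwp f (m+1) y ≤ pconv (Cf f (m+1)) f n
      apply pconv_le_of
      intro z hz
      calc pwp f m z + f (y - z)
          ≤ Cf f (m+1) (n - (y - z)) + f (y - z) := by
            refine add_le_add ?_ le_rfl
            exact le_trans (le_max_right 0 _) (Cf_le f m (by omega))
        _ = Cf f (m+1) (n - (y - z)) + f (n - (n - (y - z))) := by
            rw [show n - (n - (y-z)) = y - z by omega]
        _ ≤ pconv (Cf f (m+1)) f n := pconv_le _ _ (by omega)

theorem Cf_le_pwp (f : ℕ → ℤ) (hf0 : f 0 = 0) (h1 : ∀ n, 0 ≤ pwp f 1 n) (j n : ℕ) :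
    Cf f j n ≤ pwp f (j+1) n := by
  cases j with
  | zero => exact h1 n
  | succ m =>
    refine Finset.sup'_le (rne n) _ ?_
    intro y hy
    have hy' : y ≤ n := Nat.lt_succ_iff.mp (Finset.mem_range.mp hy)
    apply max_le
    · exact pwp_nonneg f hf0 h1 (m+2) (by omega) n
    · calc pwp f m y ≤ pwp f m y + pwp f 1 (n - y) := by
            have := h1 (n - y); omega
        _ ≤ pconv (pwp f m) (pwp f 1) n := pconv_le _ _ hy'
        _ = pwp f (m+2) n := (pwp_add f m 1 n).symm

theorem sup'_range_one (h : ℕ → ℤ) : (Finset.range (0+1)).sup' (rne 0) h = h 0 := by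
  apply le_antisymm
  · apply Finset.sup'_le
    intro x hx
    have : x = 0 := by simpa using Nat.lt_one_iff.mp (Finset.mem_range.mp hx)
    rw [this]
  · exact Finset.le_sup' h (Finset.mem_range.mpr (by omega))

-- A's chain, abstracted over the base row f
def rowAF (f : ℕ → ℤ) : ℕ → ℕ → ℤ
  | 0, _ => 0
  | 1, n => f n
  | (j+2), n => (List.range n).foldl (fun a x => max a (rowAF f (j+1) (n - x) + f x)) 0

theorem rowAF_zero (f : ℕ → ℤ) (hf0 : f 0 = 0) : ∀ (r : ℕ), rowAF f r 0 = 0 := by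
  intro r
  match r with
  | 0 => rfl
  | 1 => exact hf0
  | (j+2) => rfl

theorem rowAF_ge_base (f : ℕ → ℤ) (hf0 : f 0 = 0) : ∀ (r n : ℕ), f n ≤ rowAF f (r+1) n := by
  intro r
  induction r with
  | zero => intro n; exact le_refl _
  | succ m ih =>
    intro n
    show f n ≤ rowAF f (m+2) n
    cases n with
    | zero => rw [hf0, rowAF_zero f hf0]
    | succ p =>
      show f (p+1) ≤ (List.range (p+1)).foldl (fun a x => max a (rowAF f (m+1) ((p+1) - x) + f x)) 0
      rw [foldl_max_sup']
      refine le_trans ?_ (le_max_right _ _)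
      refine le_trans ?_ (Finset.le_sup' (fun x => rowAF f (m+1) ((p+1) - x) + f x)
        (Finset.mem_range.mpr (show 0 < p+1 by omega)))
      show f (p+1) ≤ rowAF f (m+1) ((p+1) - 0) + f 0
      rw [hf0, add_zero]
      exact ih (p+1)

theorem rowAF_succ (f : ℕ → ℤ) (hf0 : f 0 = 0) (j n : ℕ) :
    rowAF f (j+2) n = max 0 (pconv (rowAF f (j+1)) f n) := by
  cases n with
  | zero =>
    rw [rowAF_zero f hf0]
    have : pconv (rowAF f (j+1)) f 0 = 0 := by
      unfold pconv
      rw [sup'_range_one]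
      rw [show (0:ℕ) - 0 = 0 from rfl, rowAF_zero f hf0, hf0]
      rfl
    rw [this]
    simp
  | succ m =>
    show (List.range (m+1)).foldl (fun a x => max a (rowAF f (j+1) ((m+1) - x) + f x)) 0 = _
    rw [foldl_max_sup']
    apply le_antisymm
    · apply max_le (le_max_left _ _)
      refine le_trans ?_ (le_max_right _ _)
      apply Finset.sup'_le
      intro x hx
      have hx' : x ≤ m := Nat.lt_succ_iff.mp (Finset.mem_range.mp hx)
      calc rowAF f (j+1) ((m+1) - x) + f x
          = rowAF f (j+1) ((m+1) - x) + f ((m+1) - ((m+1) - x)) := by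
            rw [show (m+1) - ((m+1) - x) = x by omega]
        _ ≤ pconv (rowAF f (j+1)) f (m+1) := pconv_le _ _ (by omega)
    · apply max_le (le_max_left _ _)
      refine le_trans ?_ (le_max_right _ _)
      apply pconv_le_of
      intro x hx
      cases x with
      | zero =>
        rw [rowAF_zero f hf0, zero_add, Nat.sub_zero]
        refine le_trans (rowAF_ge_base f hf0 j (m+1)) ?_
        refine le_trans ?_ (Finset.le_sup' (fun x => rowAF f (j+1) ((m+1) - x) + f x)
          (Finset.mem_range.mpr (show 0 < m+1 by omega)))
        show rowAF f (j+1) (m+1) ≤ rowAF f (j+1) ((m+1) - 0) + f 0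
        rw [hf0, add_zero, Nat.sub_zero]
      | succ y =>
        refine le_trans ?_ (Finset.le_sup' (fun x => rowAF f (j+1) ((m+1) - x) + f x)
          (Finset.mem_range.mpr (show (m+1) - (y+1) < m+1 by omega)))
        show rowAF f (j+1) (y+1) + f ((m+1) - (y+1))
            ≤ rowAF f (j+1) ((m+1) - ((m+1) - (y+1))) + f ((m+1) - (y+1))
        rw [show (m+1) - ((m+1) - (y+1)) = y+1 by omega]

theorem rowAF_closed (f : ℕ → ℤ) (hf0 : f 0 = 0) : ∀ (j n : ℕ),
    rowAF f (j+2) n = max (pwp f (j+1) n) (Cf f j n) := by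
  intro j
  induction j with
  | zero =>
    intro n
    rw [rowAF_succ f hf0 0 n]
    have h1 : pconv (rowAF f 1) f n = pconv f f n :=
      pconv_congr (fun x _ => rfl) (fun _ _ => rfl)
    rw [h1]
    show max 0 (pwp f 1 n) = max (pwp f 1 n) (Cf f 0 n)
    exact max_comm _ _
  | succ j ih =>
    intro n
    rw [rowAF_succ f hf0 (j+1) n]
    have h1 : pconv (rowAF f (j+2)) f n
        = pconv (fun m => max (pwp f (j+1) m) (Cf f j m)) f n :=
      pconv_congr (fun x _ => ih x) (fun _ _ => rfl)
    have h2 : pconv (fun m => max (pwp f (j+1) m) (Cf f j m)) f n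
        = max (pconv (pwp f (j+1)) f n) (pconv (Cf f j) f n) := by
      unfold pconv
      rw [← sup'_max_split]
      apply Finset.sup'_congr _ rfl
      intro x _
      rw [max_add_add_right]
    rw [h1, h2]
    rw [show pconv (pwp f (j+1)) f n = pwp f (j+2) n from rfl]
    rw [max_left_comm]
    rw [clamp_step f hf0 j n]

-- every amount splits into two parts free of digits 3, 6, 9 (no carries), each of creativity 0
theorem creatGo_split (P : List Int) : ∀ (x : ℕ), ∀ (pos : ℕ),
    ∃ a b : ℕ, a + b = x ∧ creatGo a P pos = 0 ∧ creatGo b P pos = 0 := by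
  intro x
  induction x using Nat.strong_induction_on with
  | _ x ih =>
    intro pos
    by_cases hx : x = 0
    · subst hx
      exact ⟨0, 0, rfl, by rw [creatGo]; simp, by rw [creatGo]; simp⟩
    · obtain ⟨a', b', hab, ha', hb'⟩ :=
        ih (x / 10) (Nat.div_lt_self (Nat.pos_of_ne_zero hx) (by norm_num)) (pos + 1)
      set d := x % 10 with hd
      have h10 : d < 10 := Nat.mod_lt _ (by norm_num)
      set d1 : ℕ := if d = 3 then 1 else if d = 6 then 2 else if d = 9 then 4 else d with hd1
      have hP : d1 < 10 ∧ d1 ≤ d ∧ d1 ≠ 3 ∧ d1 ≠ 6 ∧ d1 ≠ 9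
          ∧ (d - d1) ≠ 3 ∧ (d - d1) ≠ 6 ∧ (d - d1) ≠ 9 := by
        simp only [hd1]; split_ifs <;> omega
      have hdm := Nat.div_add_mod x 10
      refine ⟨10 * a' + d1, 10 * b' + (d - d1), by omega, ?_, ?_⟩
      · by_cases hz : 10 * a' + d1 = 0
        · rw [creatGo]; simp [hz]
        · rw [creatGo, dif_neg hz]
          have hm : (10 * a' + d1) % 10 = d1 := by omega
          have hq : (10 * a' + d1) / 10 = a' := by omega
          rw [hm, hq, if_neg (by omega), ha']
          norm_num
      · by_cases hz : 10 * b' + (d - d1) = 0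
        · rw [creatGo]; simp [hz]
        · rw [creatGo, dif_neg hz]
          have hm : (10 * b' + (d - d1)) % 10 = d - d1 := by omega
          have hq : (10 * b' + (d - d1)) / 10 = b' := by omega
          rw [hm, hq, if_neg (by omega), hb']
          norm_num

theorem creat_zero (P : List Int) : creat 0 P = 0 := by
  rw [creat]
  rw [creatGo]
  simp

-- the square of the creativity row is nonnegative: split n into two creativity-zero parts
theorem creat_pwp1_nonneg (P : List Int) (n : ℕ) :
    0 ≤ pwp (fun m : ℕ => creat (m:ℤ) P) 1 n := by
  obtain ⟨a, b, hab, ha, hb⟩ := creatGo_split P n 0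
  have hfa : creat ((a:ℕ):ℤ) P = 0 := by unfold creat; rw [Int.toNat_natCast]; exact ha
  have hfb : creat (((n - a : ℕ)):ℤ) P = 0 := by
    unfold creat; rw [Int.toNat_natCast, show n - a = b by omega]; exact hb
  calc (0:ℤ) = creat ((a:ℕ):ℤ) P + creat (((n - a : ℕ)):ℤ) P := by rw [hfa, hfb]; norm_num
    _ ≤ pconv (fun m : ℕ => creat (m:ℤ) P) (fun m : ℕ => creat (m:ℤ) P) n :=
        pconv_le _ _ (by omega)
    _ = pwp (fun m : ℕ => creat (m:ℤ) P) 1 n := rfl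

-- A's full chain collapses to the pure max-plus power: the clamp term is dominated
theorem rowAF_eq_pwp (f : ℕ → ℤ) (hf0 : f 0 = 0) (h1 : ∀ n, 0 ≤ pwp f 1 n) :
    ∀ (K : ℕ), 1 ≤ K → ∀ (n : ℕ), rowAF f K n = pwp f (K-1) n := by
  intro K hK n
  match K, hK with
  | 1, _ => rfl
  | (j+2), _ =>
    rw [rowAF_closed f hf0 j n, show (j+2)-1 = j+1 by omega]
    exact max_eq_left (Cf_le_pwp f hf0 h1 j n)

-- B-side bridge
theorem convL_length (a b : List Int) : (convL a b).length = a.length := by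
  simp [convL, PySem.List.length_pyRange_one]

theorem convL_getD (a b : List Int) (n : ℕ) (hn : n < a.length) (_hb : a.length ≤ b.length) :
    (convL a b).getD n 0 = pconv (fun x => a.getD x 0) (fun x => b.getD x 0) n := by
  unfold convL
  simp only [PySem.List.len_eq]
  rw [PySem.List.pyRange_zero_nat a.length, List.map_map]
  rw [PySem.List.getD_map_range _ _ _ _ hn]
  simp only [Function.comp_apply]
  rw [show ((n : ℤ) + 1) = ((n+1 : ℕ) : ℤ) by push_cast; ring]
  rw [PySem.List.pyRange_zero_nat (n+1), List.map_map]
  have hcong : (List.range (n+1)).map ((fun x => PySem.List.pyGetD a x 0 + PySem.List.pyGetD b ((n:ℤ) - x) 0) ∘ (fun k : ℕ => (k:ℤ)))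
      = (List.range (n+1)).map (fun c : ℕ => a.getD c 0 + b.getD (n - c) 0) := by
    apply List.map_congr_left
    intro c hc
    have hc' : c ≤ n := Nat.lt_succ_iff.mp (List.mem_range.mp hc)
    simp only [Function.comp_apply]
    rw [show ((n:ℤ) - (c:ℤ)) = ((n - c : ℕ) : ℤ) by omega]
    rw [PySem.List.pyGetD_natCast, PySem.List.pyGetD_natCast]
  rw [hcong, max?_map_range]
  rfl

theorem mpPow_length (a : List Int) (e : ℕ) : (mpPow a e).length = a.length := by
  induction e using mpPow.induct a with
  | case1 e he => rw [mpPow, if_pos he]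
  | case2 e he hev ih =>
    rw [mpPow, if_neg he]
    simp only [if_pos hev]
    rw [convL_length, ih]
  | case3 e he hodd ih =>
    rw [mpPow, if_neg he]
    simp only [if_neg hodd]
    rw [convL_length, convL_length, ih]

theorem mpPow_getD (f : ℕ → ℤ) (a : List Int) (ha : ∀ n, n < a.length → a.getD n 0 = f n) :
    ∀ (e : ℕ), 1 ≤ e → ∀ n, n < a.length → (mpPow a e).getD n 0 = pwp f (e-1) n := by
  intro e
  induction e using mpPow.induct a with
  | case1 e he =>
    intro h1 n hn
    have : e = 1 := by omega
    subst this
    rw [mpPow]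
    simp only [if_pos (by omega : 1 ≤ 1)]
    exact ha n hn
  | case2 e he hev ih =>
    intro _ n hn
    have hh : 1 ≤ e / 2 := by omega
    have hmod := Nat.div_add_mod e 2
    have hlen : (mpPow a (e/2)).length = a.length := mpPow_length a (e/2)
    rw [mpPow, if_neg he]
    simp only [if_pos hev]
    rw [convL_getD _ _ n (by omega) (by omega)]
    have : pconv (fun x => (mpPow a (e/2)).getD x 0) (fun x => (mpPow a (e/2)).getD x 0) n
        = pconv (pwp f (e/2 - 1)) (pwp f (e/2 - 1)) n := by
      apply pconv_congr
      · intro x hx; exact ih hh x (by omega)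
      · intro x hx; exact ih hh x (by omega)
    rw [this, ← pwp_add]
    congr 1
    omega
  | case3 e he hodd ih =>
    intro _ n hn
    have hh : 1 ≤ e / 2 := by omega
    have hmod := Nat.div_add_mod e 2
    have hlen : (mpPow a (e/2)).length = a.length := mpPow_length a (e/2)
    have hsqlen : (convL (mpPow a (e/2)) (mpPow a (e/2))).length = a.length := by
      rw [convL_length, hlen]
    have hsq : ∀ m, m < a.length →
        (convL (mpPow a (e/2)) (mpPow a (e/2))).getD m 0 = pwp f (e/2 - 1 + (e/2 - 1) + 1) m := by
      intro m hm
      rw [convL_getD _ _ m (by omega) (by omega)]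
      rw [show pconv (fun x => (mpPow a (e/2)).getD x 0) (fun x => (mpPow a (e/2)).getD x 0) m
          = pconv (pwp f (e/2 - 1)) (pwp f (e/2 - 1)) m from
        pconv_congr (fun x hx => ih hh x (by omega)) (fun x hx => ih hh x (by omega))]
      rw [← pwp_add]
    rw [mpPow, if_neg he]
    simp only [if_neg hodd]
    rw [convL_getD _ _ n (by omega) (by omega)]
    rw [show pconv (fun x => (convL (mpPow a (e/2)) (mpPow a (e/2))).getD x 0) (fun x => a.getD x 0) n
        = pconv (pwp f (e/2 - 1 + (e/2 - 1) + 1)) (pwp f 0) n from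
      pconv_congr (fun x hx => hsq x (by omega)) (fun x hx => ha x (by omega))]
    rw [← pwp_add]
    congr 1
    omega

theorem alt_eq (P : List Int) (k N : ℤ) (hk : 1 ≤ k) (hN : 0 ≤ N) :
    algoritmo1_sol_alt k N P = pwp (fun n : ℕ => creat (n:ℤ) P) (k.toNat - 1) N.toNat := by
  set f : ℕ → ℤ := fun n : ℕ => creat (n:ℤ) P with hf
  set Nn := N.toNat with hNn
  have hNcast : N = ((Nn : ℕ) : ℤ) := by omega
  have hN1cast : N + 1 = ((Nn + 1 : ℕ) : ℤ) := by omega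
  unfold algoritmo1_sol_alt
  rw [hN1cast, PySem.List.pyRange_zero_nat (Nn+1), List.map_map]
  set F : List Int := (List.range (Nn+1)).map ((fun i => creat i P) ∘ (fun k : ℕ => (k:ℤ))) with hF
  have hFlen : F.length = Nn + 1 := by simp [hF]
  have hFent : ∀ n, n < F.length → F.getD n 0 = f n := by
    intro n hn
    rw [hF, PySem.List.getD_map_range _ _ _ _ (by omega : n < Nn+1)]
    rfl
  rw [hNcast, PySem.List.pyGetD_natCast]
  exact mpPow_getD f F hFent k.toNat (by omega) Nn (by omega)

-- ===== A-side bridge: table operations in Nat form =====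
def gT (t : List (List Int)) (j i : ℕ) : Int := (t.getD j []).getD i 0

def sT (t : List (List Int)) (j i : ℕ) (v : Int) : List (List Int) :=
  t.set j ((t.getD j []).set i v)

theorem tget_cast (t : List (List Int)) (j i : ℕ) : tget t (j:ℤ) (i:ℤ) = gT t j i := by
  simp [tget, gT]

theorem tset_cast (t : List (List Int)) (j i : ℕ) (v : Int) :
    tset t (j:ℤ) (i:ℤ) v = sT t j i v := by
  simp [tset, sT]

theorem len_sT (t : List (List Int)) (j i : ℕ) (v : Int) : (sT t j i v).length = t.length := by
  simp [sT]

theorem rowlen_sT (t : List (List Int)) (j i : ℕ) (v : Int) (hj : j < t.length) :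
    ((sT t j i v).getD j []).length = (t.getD j []).length := by
  simp [sT, List.getD_eq_getElem?_getD, List.getElem?_set_self (by simpa using hj)]

theorem g_s_self (t : List (List Int)) (j i : ℕ) (v : Int)
    (hj : j < t.length) (hi : i < (t.getD j []).length) :
    gT (sT t j i v) j i = v := by
  unfold gT sT
  rw [List.getD_eq_getElem?_getD (l := t.set j ((t.getD j []).set i v)) (i := j),
    List.getElem?_set_self (by simpa using hj)]
  simp only [Option.getD_some]
  rw [List.getD_eq_getElem?_getD (l := (t.getD j []).set i v) (i := i),
    List.getElem?_set_self (by simpa using hi)]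
  rfl

theorem g_s_row_ne (t : List (List Int)) (j i r c : ℕ) (v : Int) (h : r ≠ j) :
    gT (sT t j i v) r c = gT t r c := by
  unfold gT sT
  rw [List.getD_eq_getElem?_getD (l := t.set j ((t.getD j []).set i v)) (i := r),
    List.getElem?_set_ne (fun hh => h hh.symm), ← List.getD_eq_getElem?_getD]

theorem s_s_same (t : List (List Int)) (j i : ℕ) (a b : Int) (hj : j < t.length) :
    sT (sT t j i a) j i b = sT t j i b := by
  unfold sT
  rw [List.getD_eq_getElem?_getD (l := t.set j _), List.getElem?_set_self (by simpa using hj)]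
  simp only [Option.getD_some, List.set_set]

theorem sT_self (t : List (List Int)) (j i : ℕ)
    (hj : j < t.length) (hi : i < (t.getD j []).length) :
    sT t j i (gT t j i) = t := by
  unfold sT gT
  rw [List.getD_eq_getElem (t.getD j []) 0 hi, List.set_getElem_self,
    List.getD_eq_getElem t [] hj, List.set_getElem_self]

theorem inner_fold (j i : ℕ) (h2 : 2 ≤ j) :
    ∀ (xs : List ℕ) (t : List (List Int)), j < t.length → i < (t.getD j []).length →
    xs.foldl (fun s x => sT s j i (max (gT s j i) (gT s (j-1) (i-x) + gT s 1 x))) t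
      = sT t j i (xs.foldl (fun a x => max a (gT t (j-1) (i-x) + gT t 1 x)) (gT t j i)) := by
  intro xs
  induction xs with
  | nil =>
    intro t hj hi
    exact (sT_self t j i hj hi).symm
  | cons x xs ih =>
    intro t hj hi
    simp only [List.foldl_cons]
    set v := max (gT t j i) (gT t (j-1) (i-x) + gT t 1 x) with hv
    have hj' : j < (sT t j i v).length := by rw [len_sT]; exact hj
    have hi' : i < ((sT t j i v).getD j []).length := by rw [rowlen_sT _ _ _ _ hj]; exact hi
    rw [ih (sT t j i v) hj' hi']
    have hfun : (fun a x' => max a (gT (sT t j i v) (j-1) (i-x') + gT (sT t j i v) 1 x'))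
        = (fun a x' => max a (gT t (j-1) (i-x') + gT t 1 x')) := by
      funext a x'
      rw [g_s_row_ne _ _ _ _ _ _ (by omega), g_s_row_ne _ _ _ _ _ _ (by omega)]
    rw [hfun, g_s_self t j i v hj hi, s_s_same t j i _ _ hj]

-- model of A's dp table: rows 1..j fully filled; row j filled only up to column i
def mkT2 (P : List Int) (K Nn j i : ℕ) : List (List Int) :=
  (List.range (K+1)).map (fun r => (List.range (Nn+1)).map
    (fun c => if 1 ≤ r ∧ (r < j ∨ (r = j ∧ c ≤ i)) then rowAF (fun n : ℕ => creat (n:ℤ) P) r c else 0))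

theorem mkT2_len (P : List Int) (K Nn j i : ℕ) : (mkT2 P K Nn j i).length = K+1 := by
  simp [mkT2]

theorem mkT2_row (P : List Int) (K Nn j i r : ℕ) (hr : r ≤ K) :
    (mkT2 P K Nn j i).getD r [] = (List.range (Nn+1)).map
      (fun c => if 1 ≤ r ∧ (r < j ∨ (r = j ∧ c ≤ i)) then rowAF (fun n : ℕ => creat (n:ℤ) P) r c else 0) := by
  unfold mkT2
  rw [PySem.List.getD_map_range _ _ _ _ (by omega : r < K+1)]

theorem mkT2_rowlen (P : List Int) (K Nn j i r : ℕ) (hr : r ≤ K) :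
    ((mkT2 P K Nn j i).getD r []).length = Nn+1 := by
  rw [mkT2_row P K Nn j i r hr]; simp

theorem mkT2_g (P : List Int) (K Nn j i r c : ℕ) (hr : r ≤ K) (hc : c ≤ Nn) :
    gT (mkT2 P K Nn j i) r c
      = if 1 ≤ r ∧ (r < j ∨ (r = j ∧ c ≤ i)) then rowAF (fun n : ℕ => creat (n:ℤ) P) r c else 0 := by
  unfold gT
  rw [mkT2_row P K Nn j i r hr, PySem.List.getD_map_range _ _ _ _ (by omega : c < Nn+1)]

theorem set_map_range {α : Type} (m : ℕ) (g : ℕ → α) (i : ℕ) (v : α) (_him : i < m) :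
    ((List.range m).map g).set i v = (List.range m).map (fun c => if c = i then v else g c) := by
  apply List.ext_getElem (by simp)
  intro p h1 h2
  simp only [List.getElem_set, List.getElem_map, List.getElem_range]
  split_ifs with hpi hpi' hpi'
  · rfl
  · omega
  · omega
  · rfl

theorem mkT2_set (P : List Int) (K Nn j i : ℕ) (hj1 : 1 ≤ j) (hjK : j ≤ K) (hi : i + 1 ≤ Nn) :
    sT (mkT2 P K Nn j i) j (i+1) (rowAF (fun n : ℕ => creat (n:ℤ) P) j (i+1))
      = mkT2 P K Nn j (i+1) := by
  unfold sT
  rw [mkT2_row P K Nn j i j hjK]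
  rw [set_map_range (Nn+1) _ (i+1) _ (by omega)]
  unfold mkT2
  rw [set_map_range (K+1) _ j _ (by omega)]
  apply List.map_congr_left
  intro r hr
  by_cases hrj : r = j
  · rw [if_pos hrj, hrj]
    apply List.map_congr_left
    intro c hc
    have hc' : c ≤ Nn := Nat.lt_succ_iff.mp (List.mem_range.mp hc)
    by_cases hci : c = i+1
    · rw [if_pos hci, hci, if_pos (by omega)]
    · rw [if_neg hci]
      by_cases hcnd : 1 ≤ j ∧ (j < j ∨ (j = j ∧ c ≤ i))
      · rw [if_pos hcnd, if_pos (by omega)]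
      · rw [if_neg hcnd, if_neg (by omega)]
  · rw [if_neg hrj]
    apply List.map_congr_left
    intro c hc
    by_cases h1 : 1 ≤ r ∧ (r < j ∨ (r = j ∧ c ≤ i))
    · rw [if_pos h1, if_pos (by omega)]
    · rw [if_neg h1, if_neg (by omega)]

theorem mkT2_roll (P : List Int) (K Nn j : ℕ) :
    mkT2 P K Nn j Nn = mkT2 P K Nn (j+1) 0 := by
  unfold mkT2
  apply List.map_congr_left
  intro r hr
  apply List.map_congr_left
  intro c hc
  have hc' : c ≤ Nn := Nat.lt_succ_iff.mp (List.mem_range.mp hc)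
  by_cases h1 : 1 ≤ r ∧ (r < j ∨ (r = j ∧ c ≤ Nn))
  · rw [if_pos h1, if_pos (by omega)]
  · rw [if_neg h1]
    by_cases h2 : 1 ≤ r ∧ (r < j+1 ∨ (r = j+1 ∧ c ≤ 0))
    · rw [if_pos h2]
      have hr1 : r = j+1 := by omega
      have hc0 : c = 0 := by omega
      rw [hr1, hc0, rowAF_zero _ (by simpa using creat_zero P)]
    · rw [if_neg h2]

-- the initial all-zero table of the port is mkT2 … 1 0
theorem dp0_eq (P : List Int) (K Nn : ℕ) :
    (List.range (K+1)).map (fun _ => List.replicate (Nn+1) (0:ℤ)) = mkT2 P K Nn 1 0 := by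
  unfold mkT2
  apply List.map_congr_left
  intro r hr
  have : (List.range (Nn+1)).map
      (fun c => if 1 ≤ r ∧ (r < 1 ∨ (r = 1 ∧ c ≤ 0)) then rowAF (fun n : ℕ => creat (n:ℤ) P) r c else 0)
      = (List.range (Nn+1)).map (fun _ => (0:ℤ)) := by
    apply List.map_congr_left
    intro c hc
    by_cases h1 : 1 ≤ r ∧ (r < 1 ∨ (r = 1 ∧ c ≤ 0))
    · rw [if_pos h1]
      have hr1 : r = 1 := by omega
      have hc0 : c = 0 := by omega
      rw [hr1, hc0, rowAF_zero _ (by simpa using creat_zero P)]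
    · rw [if_neg h1]
  rw [this]
  rw [show (fun _ : ℕ => (0:ℤ)) = Function.const ℕ (0:ℤ) from rfl, List.map_const, List.length_range]

-- row-1 fill loop
theorem dp1_fold (P : List Int) (K Nn : ℕ) (hK : 1 ≤ K) :
    ∀ (m : ℕ), m ≤ Nn →
    (List.range m).foldl (fun t c => sT t 1 (1+c) (creat (((1+c : ℕ) : ℤ)) P)) (mkT2 P K Nn 1 0)
      = mkT2 P K Nn 1 m := by
  intro m
  induction m with
  | zero => intro _; rfl
  | succ p ih =>
    intro hm
    rw [List.range_succ, List.foldl_append, ih (by omega), List.foldl_cons, List.foldl_nil]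
    have : creat (((1 + p : ℕ) : ℤ)) P = rowAF (fun n : ℕ => creat (n:ℤ) P) 1 (p+1) := by
      rw [show 1 + p = p + 1 by omega]; rfl
    rw [this, show 1 + p = p + 1 by omega]
    exact mkT2_set P K Nn 1 p (by omega) hK (by omega)

theorem rowAF_fold (f : ℕ → ℤ) (j n : ℕ) (hj : 2 ≤ j) :
    (List.range n).foldl (fun a x => max a (rowAF f (j-1) (n-x) + f x)) 0 = rowAF f j n := by
  obtain ⟨jj, rfl⟩ : ∃ jj, j = jj+2 := ⟨j-2, by omega⟩
  rw [show jj+2-1 = jj+1 by omega]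
  rfl

theorem iloop (P : List Int) (K Nn j : ℕ) (hj2 : 2 ≤ j) (hjK : j ≤ K) :
    ∀ (m : ℕ), m ≤ Nn →
    (List.range m).foldl (fun t c =>
      (List.range (1+c)).foldl (fun s x =>
        sT s j (1+c) (max (gT s j (1+c)) (gT s (j-1) ((1+c)-x) + gT s 1 x))) t)
      (mkT2 P K Nn j 0) = mkT2 P K Nn j m := by
  intro m
  induction m with
  | zero => intro _; rfl
  | succ p ih =>
    intro hm
    rw [List.range_succ, List.foldl_append, ih (by omega), List.foldl_cons, List.foldl_nil]
    set t := mkT2 P K Nn j p with ht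
    have hlen : j < t.length := by rw [ht, mkT2_len]; omega
    have hrow : (1+p) < (t.getD j []).length := by rw [ht, mkT2_rowlen P K Nn j p j (by omega)]; omega
    rw [inner_fold j (1+p) hj2 (List.range (1+p)) t hlen hrow]
    have hstart : gT t j (1+p) = 0 := by
      rw [ht, mkT2_g P K Nn j p j (1+p) (by omega) (by omega), if_neg (by omega)]
    have hbody : (List.range (1+p)).foldl
        (fun a x => max a (gT t (j-1) ((1+p)-x) + gT t 1 x)) (gT t j (1+p))
        = (List.range (1+p)).foldl
        (fun a x => max a (rowAF (fun n : ℕ => creat (n:ℤ) P) (j-1) ((1+p)-x)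
          + (fun n : ℕ => creat (n:ℤ) P) x)) 0 := by
      rw [hstart]
      apply PySem.List.foldl_congr_mem
      intro a x hx
      have hx' : x ≤ p := by have := List.mem_range.mp hx; omega
      rw [ht, mkT2_g P K Nn j p (j-1) ((1+p)-x) (by omega) (by omega), if_pos (by omega)]
      rw [mkT2_g P K Nn j p 1 x (by omega) (by omega), if_pos (by omega)]
      rfl
    rw [hbody, rowAF_fold (fun n : ℕ => creat (n:ℤ) P) j (1+p) hj2, show 1+p = p+1 by omega]
    exact mkT2_set P K Nn j p (by omega) hjK (by omega)

theorem jloop (P : List Int) (K Nn : ℕ) (hK : 1 ≤ K) :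
    ∀ (m : ℕ), m ≤ K-1 →
    (List.range m).foldl (fun t c =>
      (List.range Nn).foldl (fun t' c' =>
        (List.range (1+c')).foldl (fun s x =>
          sT s (2+c) (1+c') (max (gT s (2+c) (1+c')) (gT s ((2+c)-1) ((1+c')-x) + gT s 1 x))) t') t)
      (mkT2 P K Nn 1 Nn) = mkT2 P K Nn (1+m) Nn := by
  intro m
  induction m with
  | zero => intro _; rfl
  | succ p ih =>
    intro hm
    rw [List.range_succ, List.foldl_append, ih (by omega), List.foldl_cons, List.foldl_nil]
    rw [mkT2_roll P K Nn (1+p), show (1+p)+1 = 2+p by omega]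
    rw [iloop P K Nn (2+p) (by omega) (by omega) Nn le_rfl]
    rw [show (2+p : ℕ) = 1+(p+1) by omega]

theorem a_eq (P : List Int) (k N : ℤ) (hk : 1 ≤ k) (hN : 0 ≤ N) :
    algoritmo1_sol k N P = rowAF (fun n : ℕ => creat (n:ℤ) P) k.toNat N.toNat := by
  obtain ⟨K, rfl⟩ : ∃ K : ℕ, k = (K:ℤ) := ⟨k.toNat, by omega⟩
  obtain ⟨Nn, rfl⟩ : ∃ n : ℕ, N = (n:ℤ) := ⟨N.toNat, by omega⟩
  have hK1 : 1 ≤ K := by omega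
  rw [Int.toNat_natCast, Int.toNat_natCast]
  unfold algoritmo1_sol
  rw [show ((K:ℤ)+1) = ((K+1:ℕ):ℤ) by push_cast; ring]
  rw [show ((Nn:ℤ)+1) = ((Nn+1:ℕ):ℤ) by push_cast; ring]
  simp only []
  -- dp0
  rw [PySem.List.pyRange_zero_nat (K+1), List.map_map]
  rw [show ((fun _ : ℤ => List.replicate (((Nn+1:ℕ):ℤ)).toNat (0:ℤ)) ∘ (fun c : ℕ => (c:ℤ)))
      = (fun _ : ℕ => List.replicate (Nn+1) (0:ℤ)) from funext (fun c => by simp)]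
  rw [dp0_eq P K Nn]
  -- dp1 loop
  rw [PySem.List.pyRange_one 1 ((Nn+1:ℕ):ℤ)]
  rw [show (((Nn+1:ℕ):ℤ) - 1).toNat = Nn by omega]
  rw [List.foldl_map]
  rw [PySem.List.foldl_congr_mem (List.range Nn) _
      (fun t (c:ℕ) => sT t 1 (1+c) (creat (((1+c : ℕ) : ℤ)) P)) _
      (by
        intro t c hc
        rw [show (1:ℤ) + (c:ℤ) = ((1+c:ℕ):ℤ) by push_cast; ring]
        rw [show (1:ℤ) = ((1:ℕ):ℤ) by norm_num]
        rw [tset_cast])]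
  rw [dp1_fold P K Nn hK1 Nn le_rfl]
  -- j loop
  rw [PySem.List.pyRange_one 2 ((K+1:ℕ):ℤ)]
  rw [show (((K+1:ℕ):ℤ) - 2).toNat = K-1 by omega]
  rw [List.foldl_map]
  rw [PySem.List.foldl_congr_mem (List.range (K-1)) _
      (fun t (c:ℕ) =>
        (List.range Nn).foldl (fun t' c' =>
          (List.range (1+c')).foldl (fun s x =>
            sT s (2+c) (1+c') (max (gT s (2+c) (1+c')) (gT s ((2+c)-1) ((1+c')-x) + gT s 1 x))) t') t) _
      (by
        intro t c hc
        rw [List.foldl_map]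
        apply PySem.List.foldl_congr_mem
        intro t' c' hc'
        rw [show (1:ℤ) + (c':ℤ) = ((1+c':ℕ):ℤ) by push_cast; ring]
        rw [PySem.List.pyRange_zero_nat (1+c'), List.foldl_map]
        apply PySem.List.foldl_congr_mem
        intro s x hx
        have hx' : x < 1+c' := List.mem_range.mp hx
        rw [show (2:ℤ) + (c:ℤ) = ((2+c:ℕ):ℤ) by push_cast; ring]
        rw [show ((2+c:ℕ):ℤ) - 1 = (((2+c)-1:ℕ):ℤ) by omega]
        rw [show ((1+c':ℕ):ℤ) - (x:ℤ) = (((1+c')-x:ℕ):ℤ) by omega]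
        rw [show (1:ℤ) = ((1:ℕ):ℤ) by norm_num]
        rw [tset_cast, tget_cast, tget_cast, tget_cast])]
  rw [jloop P K Nn hK1 (K-1) le_rfl]
  rw [show 1+(K-1) = K by omega]
  rw [tget_cast]
  rw [mkT2_g P K Nn K Nn K Nn le_rfl le_rfl, if_pos (by omega)]

theorem alt_zero (P : List Int) : algoritmo1_sol_alt 0 0 P = 0 := by
  show PySem.List.pyGetD
    (mpPow ((PySem.List.pyRange 0 (0+1) 1).map (fun i => creat i P)) (0:ℤ).toNat) 0 0 = 0
  have hpow : mpPow ((PySem.List.pyRange 0 (0+1) 1).map (fun i => creat i P)) (0:ℤ).toNat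
      = (PySem.List.pyRange 0 (0+1) 1).map (fun i => creat i P) := by
    rw [mpPow]
    norm_num
  rw [hpow]
  have hr : PySem.List.pyRange 0 (0+1) 1 = [0] := by
    rw [show ((0:ℤ)+1) = ((1:ℕ):ℤ) by norm_num, PySem.List.pyRange_zero_nat 1]
    rfl
  rw [hr]
  simp [creat_zero]

theorem a_zero (P : List Int) : algoritmo1_sol 0 0 P = 0 := by
  unfold algoritmo1_sol
  rw [PySem.List.pyRange_one_eq_nil (a := 1) (b := (0:ℤ)+1) (by norm_num)]
  rw [PySem.List.pyRange_one_eq_nil (a := 2) (b := (0:ℤ)+1) (by norm_num)]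
  rw [show ((0:ℤ)+1) = ((1:ℕ):ℤ) by norm_num, PySem.List.pyRange_zero_nat 1]
  simp [tget]

-- ===== VERDICT (by name: the statement is the Claim_ definition above) =====
theorem algoritmo1_sol_spec : Claim_equal_algoritmo1_sol := by
  intro k N P _hdom hpre
  unfold Spec_algoritmo1_sol
  obtain ⟨hk01, hN, _⟩ := hpre
  rcases hk01 with hk1 | ⟨hk0, hN0⟩
  · rw [a_eq P k N hk1 hN, alt_eq P k N hk1 hN]
    exact rowAF_eq_pwp (fun n : ℕ => creat (n:ℤ) P) (by simpa using creat_zero P)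
      (creat_pwp1_nonneg P) k.toNat (by omega) N.toNat
  · subst hk0; subst hN0
    rw [a_zero P, alt_zero P]
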